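-- pv_equiv track=rewrite | github.com/vterreno/ejercicios-curso-python | Ejercicios/Ejercicio #16 - Volumen 4 - 400 - Durmiendo en albergues/Ejercicio #16 - Santiago Garcia.py | camasdisp
-- ===== SOURCE A (Python) =====
-- def camasdisp(prueba,situacion):
--     espacios=-1
--     bandera2=0
--     espaciostotales=0
--     if situacion==0:
--         for i in range(len(prueba)):
--             if prueba[i]==".":
--                 espacios+=1
--             if prueba[i]=="x" or i==(len(prueba))-1:
--                 if espacios>espaciostotales and (bandera2==0 or i==(len(prueba))-1):
--                     espaciostotales=espacios
--                 elif espacios/2>espaciostotales and espacios%2==0: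
--                     espaciostotales=int(espacios/2)
--                 elif espacios//2>espaciostotales:
--                     espaciostotales=int(espacios/2)
--                 espacios=-1
--                 bandera2=1
--     elif situacion==1:
--         for i in range(len(prueba)):
--             if prueba[i]==".":
--                 espacios+=1
--             if prueba[i]=="x":
--                 if espacios/2>espaciostotales and espacios%2==0:
--                     espaciostotales=int(espacios/2)
--                 elif espacios//2>espaciostotales:
--                     espaciostotales=int(espacios/2)
--                 espacios=-1
--     elif situacion==2:
--         for i in range(len(prueba)):
--             if prueba[i]==".":
--                 espacios+=1
--             if prueba[i]=="x" or i==(len(prueba))-1: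
--                 if espacios>espaciostotales and i==(len(prueba))-1:
--                     espaciostotales=espacios
--                 elif espacios/2>espaciostotales and espacios%2==0:
--                     espaciostotales=int(espacios/2)
--                 elif espacios//2>espaciostotales:
--                     espaciostotales=int(espacios/2)
--                 espacios=-1
--     else:
--         for i in range(len(prueba)):
--             if prueba[i]==".":
--                 espacios+=1
--             if prueba[i]=="x":
--                 if espacios>espaciostotales and bandera2==0 :
--                     espaciostotales=espacios
--                 elif espacios/2>espaciostotales and espacios%2==0:
--                     espaciostotales=int(espacios/2)
--                 elif espacios//2>espaciostotales:
--                     espaciostotales=int(espacios/2)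
--                 espacios=-1
--                 bandera2=1
--     return espaciostotales
-- ===== SOURCE B (Python) =====
-- def camasdisp(prueba, situacion):
--     # Two-pass region decomposition: first partition the string into the regions
--     # between 'x' markers (dot count + how the region is closed), then score each
--     # region against the situacion's rule, keeping the running maximum.
--     regions = []
--     dots = 0
--     for c in prueba:
--         if c == "x":
--             regions.append((dots, True))
--             dots = 0
--         else:
--             dots += 1 if c == "." else 0
--     regions.append((dots, False))
--
--     n = len(regions)
--     endx = prueba.endswith("x")
--     total = 0
--     for k, (d, closed_by_x) in enumerate(regions):
--         if situacion != 0 and situacion != 2 and not closed_by_x: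
--             continue  # situaciones 1 and "otherwise" only score regions closed by an 'x'
--         e = d - 1
--         at_end = (k == n - 2 and endx) or (k == n - 1 and not endx)
--         if situacion == 0:
--             full = k == 0 or at_end
--         elif situacion == 1:
--             full = False
--         elif situacion == 2:
--             full = at_end
--         else:
--             full = k == 0
--         if full and e > total:
--             total = e
--         elif e // 2 > total:
--             total = e // 2
--     return total
-- ===== Notes on version B (the rewrite author's own statement) =====
-- stated objective: alternative
-- what changed: B replaces A's single stateful index loop (espacios=-1 sentinel, bandera2 flag, i==len(prueba)-1 checks and a three-way update chain) by a two-pass region decomposition: it first partitions the string into the regions between 'x' markers (dot count plus closed-by-'x' flag), then scores each region against the situacion's full/half rule keeping a running maximum.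
import Mathlib
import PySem

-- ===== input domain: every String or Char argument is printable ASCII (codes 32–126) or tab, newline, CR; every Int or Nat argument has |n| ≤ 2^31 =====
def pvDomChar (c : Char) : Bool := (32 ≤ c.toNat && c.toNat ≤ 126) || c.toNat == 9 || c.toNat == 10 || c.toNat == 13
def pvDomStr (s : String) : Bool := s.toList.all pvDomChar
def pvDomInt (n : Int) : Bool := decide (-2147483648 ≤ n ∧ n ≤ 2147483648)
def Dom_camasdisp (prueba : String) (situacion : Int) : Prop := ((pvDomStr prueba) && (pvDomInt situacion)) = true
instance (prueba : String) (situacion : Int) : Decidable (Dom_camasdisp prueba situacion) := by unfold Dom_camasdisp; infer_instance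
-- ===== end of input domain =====

-- B replaces A's single stateful index loop (sentinel espacios=-1, bandera2, i==len-1 checks)
-- by two passes: build the list of regions between 'x' markers, then score each region.

-- ===== PORT A =====
-- Loop of the situacion==0 branch: state (i, espacios, bandera2, espaciostotales), one step per character.
-- Python's `espacios/2>espaciostotales and espacios%2==0` (float compare) is ported as the integer
-- compare on PySem.Int.floordiv: for even espacios the float quotient IS that integer (exact here).
-- `int(espacios/2)` (float division truncated) is ported as Int.tdiv espacios 2 (truncating division),
-- exact for the magnitudes reachable here.
def pvLoopA0 (n : Int) : List Char → Int → Int → Int → Int → Int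
  | [], _, _, _, tot => tot
  | c :: rest, i, esp, band, tot =>
    let esp := if c == '.' then esp + 1 else esp
    if c == 'x' ∨ i = n - 1 then
      let tot :=
        if esp > tot ∧ (band = 0 ∨ i = n - 1) then esp
        else if PySem.Int.floordiv esp 2 > tot ∧ PySem.Int.mod esp 2 = 0 then esp.tdiv 2
        else if PySem.Int.floordiv esp 2 > tot then esp.tdiv 2
        else tot
      pvLoopA0 n rest (i + 1) (-1) 1 tot
    else
      pvLoopA0 n rest (i + 1) esp band tot

-- situacion==1 branch: closes only on 'x'; i and bandera2 are never read by this branch's body.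
def pvLoopA1 : List Char → Int → Int → Int
  | [], _, tot => tot
  | c :: rest, esp, tot =>
    let esp := if c == '.' then esp + 1 else esp
    if c == 'x' then
      let tot :=
        if PySem.Int.floordiv esp 2 > tot ∧ PySem.Int.mod esp 2 = 0 then esp.tdiv 2
        else if PySem.Int.floordiv esp 2 > tot then esp.tdiv 2
        else tot
      pvLoopA1 rest (-1) tot
    else
      pvLoopA1 rest esp tot

-- situacion==2 branch.
def pvLoopA2 (n : Int) : List Char → Int → Int → Int → Int
  | [], _, _, tot => tot
  | c :: rest, i, esp, tot =>
    let esp := if c == '.' then esp + 1 else esp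
    if c == 'x' ∨ i = n - 1 then
      let tot :=
        if esp > tot ∧ i = n - 1 then esp
        else if PySem.Int.floordiv esp 2 > tot ∧ PySem.Int.mod esp 2 = 0 then esp.tdiv 2
        else if PySem.Int.floordiv esp 2 > tot then esp.tdiv 2
        else tot
      pvLoopA2 n rest (i + 1) (-1) tot
    else
      pvLoopA2 n rest (i + 1) esp tot

-- else branch: closes only on 'x'; i is never read by this branch's body.
def pvLoopA3 : List Char → Int → Int → Int → Int
  | [], _, _, tot => tot
  | c :: rest, esp, band, tot =>
    let esp := if c == '.' then esp + 1 else esp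
    if c == 'x' then
      let tot :=
        if esp > tot ∧ band = 0 then esp
        else if PySem.Int.floordiv esp 2 > tot ∧ PySem.Int.mod esp 2 = 0 then esp.tdiv 2
        else if PySem.Int.floordiv esp 2 > tot then esp.tdiv 2
        else tot
      pvLoopA3 rest (-1) 1 tot
    else
      pvLoopA3 rest esp band tot

def camasdisp (prueba : String) (situacion : Int) : Int :=
  let cs := prueba.toList
  let n : Int := cs.length
  if situacion = 0 then pvLoopA0 n cs 0 (-1) 0 0
  else if situacion = 1 then pvLoopA1 cs (-1) 0
  else if situacion = 2 then pvLoopA2 n cs 0 (-1) 0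
  else pvLoopA3 cs (-1) 0 0

-- ===== PORT B =====
-- First pass of Source B: the regions between 'x' markers, as (dot count, closed-by-'x') pairs.
def pvRegions : List Char → Int → List (Int × Bool)
  | [], dots => [(dots, false)]
  | c :: rest, dots =>
    if c == 'x' then (dots, true) :: pvRegions rest 0
    else pvRegions rest (dots + (if c == '.' then 1 else 0))

-- Second pass of Source B: score each region (k is the enumerate index).
def pvRuleLoop (situacion n : Int) (endx : Bool) : List (Int × Bool) → Int → Int → Int
  | [], _, tot => tot
  | (d, closedByX) :: rest, k, tot =>
    if (situacion ≠ 0 ∧ situacion ≠ 2) ∧ closedByX = false then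
      pvRuleLoop situacion n endx rest (k + 1) tot
    else
      let e := d - 1
      let atEnd : Bool := (k == n - 2 && endx) || (k == n - 1 && !endx)
      let full : Bool :=
        if situacion = 0 then k == 0 || atEnd
        else if situacion = 1 then false
        else if situacion = 2 then atEnd
        else k == 0
      let tot :=
        if full = true ∧ e > tot then e
        else if PySem.Int.floordiv e 2 > tot then PySem.Int.floordiv e 2
        else tot
      pvRuleLoop situacion n endx rest (k + 1) tot

def camasdisp_alt (prueba : String) (situacion : Int) : Int :=
  let regions := pvRegions prueba.toList 0
  let n : Int := regions.length
  let endx := PySem.Str.endswith prueba "x"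
  pvRuleLoop situacion n endx regions 0 0

-- ===== PRECONDITION & SPEC =====
def Spec_camasdisp (prueba : String) (situacion : Int) (out : Int) : Prop := out = camasdisp_alt prueba situacion
instance (prueba : String) (situacion : Int) (out : Int) : Decidable (Spec_camasdisp prueba situacion out) := by unfold Spec_camasdisp; infer_instance

-- ===== CLAIM (what is proved, stated in full; the proofs are below) =====
def Claim_equal_camasdisp : Prop := ∀ (prueba : String) (situacion : Int), Dom_camasdisp prueba situacion → Spec_camasdisp prueba situacion (camasdisp prueba situacion)

-- ===== LEMMAS AND PROOFS =====

lemma length_pvRegions (cs : List Char) (d : Int) :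
    (pvRegions cs d).length = cs.count 'x' + 1 := by
  induction cs generalizing d with
  | nil => simp [pvRegions]
  | cons c rest ih =>
    by_cases h : c = 'x' <;> simp [pvRegions, h, ih]

lemma tdiv_eq_floordiv_of_gt (esp tot : Int) (htot : 0 ≤ tot)
    (h : PySem.Int.floordiv esp 2 > tot) : esp.tdiv 2 = PySem.Int.floordiv esp 2 := by
  have h2 : (0:Int) < 2 := by norm_num
  have hesp : 0 ≤ esp := by
    rcases (PySem.Int.le_floordiv_iff_mul_le (a := esp) (b := 2) (q := tot + 1) h2).mp (by omega) with h'
    omega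
  rw [PySem.Int.floordiv_eq_ediv_of_pos h2, Int.tdiv_eq_ediv_of_nonneg hesp]

-- A's three-way update chain equals B's two-way one (the two half branches coincide).
lemma close_eq (esp tot : Int) (htot : 0 ≤ tot) (p : Prop) [Decidable p] (b : Bool)
    (hpb : p ↔ b = true) :
    (if esp > tot ∧ p then esp
     else if PySem.Int.floordiv esp 2 > tot ∧ PySem.Int.mod esp 2 = 0 then esp.tdiv 2
     else if PySem.Int.floordiv esp 2 > tot then esp.tdiv 2
     else tot)
    = (if b = true ∧ esp > tot then esp
       else if PySem.Int.floordiv esp 2 > tot then PySem.Int.floordiv esp 2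
       else tot) := by
  by_cases hfd : PySem.Int.floordiv esp 2 > tot
  · have ht := tdiv_eq_floordiv_of_gt esp tot htot hfd
    split_ifs <;> first | rfl | exact ht | tauto
  · split_ifs <;> first | rfl | tauto

-- The same without the full branch (situacion==1's chain).
lemma chain1_eq (esp tot : Int) (htot : 0 ≤ tot) :
    (if PySem.Int.floordiv esp 2 > tot ∧ PySem.Int.mod esp 2 = 0 then esp.tdiv 2
     else if PySem.Int.floordiv esp 2 > tot then esp.tdiv 2
     else tot)
    = (if PySem.Int.floordiv esp 2 > tot then PySem.Int.floordiv esp 2 else tot) := by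
  by_cases hfd : PySem.Int.floordiv esp 2 > tot
  · have ht := tdiv_eq_floordiv_of_gt esp tot htot hfd
    split_ifs <;> first | rfl | exact ht
  · split_ifs <;> first | rfl | tauto

lemma step_nonneg (e tot : Int) (htot : 0 ≤ tot) (b : Bool) :
    0 ≤ (if b = true ∧ e > tot then e
         else if PySem.Int.floordiv e 2 > tot then PySem.Int.floordiv e 2
         else tot) := by
  split_ifs <;> omega

lemma getLast?_cons_ne_nil (c : Char) (rest : List Char) (h : rest ≠ []) :
    (c :: rest).getLast? = rest.getLast? := by
  obtain ⟨c', hc'⟩ : ∃ c', rest.getLast? = some c' := by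
    cases hl : rest.getLast? with
    | none => exact absurd (List.getLast?_eq_none_iff.mp hl) h
    | some x => exact ⟨x, rfl⟩
  simp [List.getLast?_cons, hc']

lemma endswith_getLast (cs : List Char) :
    ∀ c, cs.getLast? = some c → PySem.Chars.endswith cs ['x'] = (c == 'x') := by
  intro c hc
  obtain ⟨t, rfl⟩ := List.getLast?_eq_some_iff.mp hc
  by_cases h : c = 'x'
  · subst h
    simp [(PySem.Chars.endswith_iff _ _).mpr ⟨t, rfl⟩]
  · have hne : ¬ PySem.Chars.endswith (t ++ [c]) ['x'] = true := by
      intro hend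
      obtain ⟨u, hu⟩ := (PySem.Chars.endswith_iff _ _).mp hend
      have hl : (t ++ [c]).getLast? = some 'x' := by rw [← hu]; simp
      simp at hl
      exact h hl
    simp_all

lemma rule_skip (s n : Int) (endx : Bool) (d : Int) (rest : List (Int × Bool)) (k tot : Int)
    (h0 : s ≠ 0) (h2 : s ≠ 2) :
    pvRuleLoop s n endx ((d, false) :: rest) k tot = pvRuleLoop s n endx rest (k + 1) tot := by
  rw [pvRuleLoop, if_pos ⟨⟨h0, h2⟩, rfl⟩]

lemma rule_nil (s n : Int) (endx : Bool) (k tot : Int) :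
    pvRuleLoop s n endx [] k tot = tot := by
  rw [pvRuleLoop]

lemma rule1_cons (n : Int) (endx : Bool) (d : Int) (rest : List (Int × Bool)) (k tot : Int) :
    pvRuleLoop 1 n endx ((d, true) :: rest) k tot
      = pvRuleLoop 1 n endx rest (k + 1)
          (if PySem.Int.floordiv (d - 1) 2 > tot then PySem.Int.floordiv (d - 1) 2 else tot) := by
  rw [pvRuleLoop, if_neg (by simp)]
  simp only [show ((1:Int) = 0) = False from by simp, if_false, if_true, Bool.false_eq_true, false_and]

lemma rule0_cons (n : Int) (endx : Bool) (d : Int) (cx : Bool) (rest : List (Int × Bool)) (k tot : Int) :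
    pvRuleLoop 0 n endx ((d, cx) :: rest) k tot
      = pvRuleLoop 0 n endx rest (k + 1)
          (if (k == 0 || ((k == n - 2 && endx) || (k == n - 1 && !endx))) = true ∧ d - 1 > tot then d - 1
           else if PySem.Int.floordiv (d - 1) 2 > tot then PySem.Int.floordiv (d - 1) 2 else tot) := by
  rw [pvRuleLoop, if_neg (by simp)]
  simp only [if_true]

lemma rule2_cons (n : Int) (endx : Bool) (d : Int) (cx : Bool) (rest : List (Int × Bool)) (k tot : Int) :
    pvRuleLoop 2 n endx ((d, cx) :: rest) k tot
      = pvRuleLoop 2 n endx rest (k + 1)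
          (if ((k == n - 2 && endx) || (k == n - 1 && !endx)) = true ∧ d - 1 > tot then d - 1
           else if PySem.Int.floordiv (d - 1) 2 > tot then PySem.Int.floordiv (d - 1) 2 else tot) := by
  rw [pvRuleLoop, if_neg (by simp)]
  norm_num

lemma rule3_cons (s n : Int) (endx : Bool) (d : Int) (rest : List (Int × Bool)) (k tot : Int)
    (h0 : s ≠ 0) (h1 : s ≠ 1) (h2 : s ≠ 2) :
    pvRuleLoop s n endx ((d, true) :: rest) k tot
      = pvRuleLoop s n endx rest (k + 1)
          (if (k == 0) = true ∧ d - 1 > tot then d - 1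
           else if PySem.Int.floordiv (d - 1) 2 > tot then PySem.Int.floordiv (d - 1) 2 else tot) := by
  rw [pvRuleLoop, if_neg (by simp)]
  simp only [if_neg h0, if_neg h1, if_neg h2]

lemma loop1_eq (cs : List Char) : ∀ (esp tot k nreg : Int) (endx : Bool),
    0 ≤ tot →
    pvLoopA1 cs esp tot
      = pvRuleLoop 1 nreg endx (pvRegions cs (esp + 1)) k tot := by
  induction cs with
  | nil =>
    intro esp tot k nreg endx htot
    rw [pvLoopA1, pvRegions, rule_skip _ _ _ _ _ _ _ (by norm_num) (by norm_num), rule_nil]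
  | cons c rest ih =>
    intro esp tot k nreg endx htot
    by_cases hc : c = 'x'
    · subst hc
      rw [pvLoopA1, pvRegions]
      simp only [show (('x':Char) == '.') = false from rfl, show (('x':Char) == 'x') = true from rfl,
        Bool.false_eq_true, if_false, if_true]
      rw [rule1_cons, chain1_eq _ _ htot]
      rw [show esp + 1 - 1 = esp from by omega, show (-1 : Int) = -1 + 1 - 1 from by omega]
      rw [show pvRegions rest 0 = pvRegions rest (-1 + 1) from by norm_num]
      exact ih _ _ (k + 1) nreg endx (by split_ifs at * <;> omega)
    · have hbx : (c == 'x') = false := by simp [hc]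
      rw [pvLoopA1, pvRegions]
      simp only [hbx, Bool.false_eq_true, if_false]
      rw [show esp + 1 + (if (c == '.' : Bool) then (1:Int) else 0)
            = (if (c == '.' : Bool) then esp + 1 else esp) + 1 from by split_ifs <;> omega]
      exact ih _ _ k nreg endx htot

lemma loop3_eq (s : Int) (hs0 : s ≠ 0) (hs1 : s ≠ 1) (hs2 : s ≠ 2) (cs : List Char) :
    ∀ (esp tot k nreg : Int) (endx : Bool),
    0 ≤ tot → 0 ≤ k →
    pvLoopA3 cs esp (if k = 0 then 0 else 1) tot
      = pvRuleLoop s nreg endx (pvRegions cs (esp + 1)) k tot := by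
  induction cs with
  | nil =>
    intro esp tot k nreg endx htot hk
    rw [pvLoopA3, pvRegions, rule_skip _ _ _ _ _ _ _ hs0 hs2, rule_nil]
  | cons c rest ih =>
    intro esp tot k nreg endx htot hk
    by_cases hc : c = 'x'
    · subst hc
      rw [pvLoopA3, pvRegions]
      simp only [show (('x':Char) == '.') = false from rfl, show (('x':Char) == 'x') = true from rfl,
        Bool.false_eq_true, if_false, if_true]
      rw [rule3_cons _ _ _ _ _ _ _ hs0 hs1 hs2]
      rw [close_eq esp tot htot _ (k == 0) (by split_ifs with h <;> simp [h])]
      rw [show esp + 1 - 1 = esp from by omega]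
      have h := ih (-1) _ (k + 1) nreg endx (step_nonneg esp tot htot (k == 0)) (by omega)
      rw [if_neg (show ¬(k + 1 = 0) from by omega),
          show (-1:Int) + 1 = 0 from by norm_num] at h
      exact h
    · have hbx : (c == 'x') = false := by simp [hc]
      rw [pvLoopA3, pvRegions]
      simp only [hbx, Bool.false_eq_true, if_false]
      rw [show esp + 1 + (if (c == '.' : Bool) then (1:Int) else 0)
            = (if (c == '.' : Bool) then esp + 1 else esp) + 1 from by split_ifs <;> omega]
      exact ih _ _ k nreg endx htot hk

-- A lone unclosed region with no dots (d ≤ 0) never changes the running maximum.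
lemma rule_tail_triv (s n : Int) (endx : Bool) (d k tot : Int) (htot : 0 ≤ tot) (hd : d ≤ 0) :
    pvRuleLoop s n endx [(d, false)] k tot = tot := by
  have hfd : ¬ (PySem.Int.floordiv (d - 1) 2 > tot) := by
    intro h
    have := (PySem.Int.le_floordiv_iff_mul_le (a := d - 1) (b := 2) (q := tot + 1) (by norm_num)).mp (by omega)
    omega
  rw [pvRuleLoop]
  by_cases hs : (s ≠ 0 ∧ s ≠ 2)
  · rw [if_pos ⟨hs, rfl⟩, rule_nil]
  · rw [if_neg (by tauto)]
    simp only []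
    rw [if_neg (by rintro ⟨-, h⟩; omega), if_neg hfd, rule_nil]

lemma loop0_eq (cs : List Char) : ∀ (i esp tot k nreg : Int) (endx : Bool),
    0 ≤ tot → 0 ≤ k →
    nreg = k + (cs.count 'x' : Int) + 1 →
    (cs = [] → esp = -1) →
    (∀ c', cs.getLast? = some c' → endx = (c' == 'x')) →
    pvLoopA0 (i + cs.length) cs i esp (if k = 0 then 0 else 1) tot
      = pvRuleLoop 0 nreg endx (pvRegions cs (esp + 1)) k tot := by
  induction cs with
  | nil =>
    intro i esp tot k nreg endx htot hk hnreg hnil hlast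
    rw [pvLoopA0, pvRegions, hnil rfl, show (-1:Int) + 1 = 0 from by norm_num]
    exact (rule_tail_triv _ _ _ _ _ _ htot (by omega)).symm
  | cons c rest ih =>
    intro i esp tot k nreg endx htot hk hnreg hnil hlast
    by_cases hc : c = 'x'
    · subst hc
      rw [pvLoopA0, pvRegions]
      simp only [show (('x':Char) == '.') = false from rfl, show (('x':Char) == 'x') = true from rfl,
        Bool.false_eq_true, if_false, if_true, true_or]
      rw [rule0_cons, show esp + 1 - 1 = esp from by omega]
      by_cases hr : rest = []
      · subst hr
        have hendx : endx = true := by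
          have h := hlast 'x' (by simp)
          simpa using h
        rw [close_eq esp tot htot _
            ((k == 0) || ((k == nreg - 2 && endx) || (k == nreg - 1 && !endx))) (by
          have hi : i = i + ((['x'].length : Nat) : Int) - 1 := by simp
          constructor
          · intro _
            simp only [hendx, hnreg, List.count_cons, List.count_nil, beq_iff_eq]
            simp
            omega
          · intro _
            exact Or.inr hi)]
        rw [pvLoopA0, pvRegions]
        exact (rule_tail_triv _ _ _ _ _ _ (step_nonneg esp tot htot _) (by omega)).symm
      · have hlen1 : (1:Int) ≤ rest.length := by
          have := List.length_pos_iff.mpr hr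
          omega
        have hcnt : (('x' :: rest).count 'x' : Int) = (rest.count 'x' : Int) + 1 := by
          simp
        have hatEnd : ((k == nreg - 2 && endx) || (k == nreg - 1 && !endx)) = false := by
          have h2 : (k == nreg - 1) = false := by
            simp only [beq_eq_false_iff_ne]
            omega
          by_cases hcz : rest.count 'x' = 0
          · obtain ⟨c', hc'⟩ : ∃ c', rest.getLast? = some c' := by
              cases hl : rest.getLast? with
              | none => exact absurd (List.getLast?_eq_none_iff.mp hl) hr
              | some x => exact ⟨x, rfl⟩
            have hend := hlast c' (by rw [getLast?_cons_ne_nil _ _ hr]; exact hc')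
            have hcx' : c' ≠ 'x' := by
              intro h
              subst h
              exact (List.count_eq_zero.mp hcz) (List.mem_of_getLast? hc')
            have : endx = false := by
              rw [hend]
              simp [hcx']
            simp [this, h2]
          · have h1 : (k == nreg - 2) = false := by
              simp only [beq_eq_false_iff_ne]
              omega
            simp [h1, h2]
        have hi : ¬ (i = i + ((('x' :: rest).length : Nat) : Int) - 1) := by
          simp only [List.length_cons]
          push_cast
          omega
        rw [close_eq esp tot htot _
            ((k == 0) || ((k == nreg - 2 && endx) || (k == nreg - 1 && !endx))) (by
          rw [hatEnd]
          simp only [Bool.or_false, beq_iff_eq]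
          constructor
          · rintro (h | h)
            · split_ifs at h with hk0
              · exact hk0
              · omega
            · exact absurd h hi
          · intro h
            left
            rw [if_pos h])]
        have h := ih (i + 1) (-1)
          (if ((k == 0) || ((k == nreg - 2 && endx) || (k == nreg - 1 && !endx))) = true ∧ esp > tot
            then esp
            else if PySem.Int.floordiv esp 2 > tot then PySem.Int.floordiv esp 2 else tot)
          (k + 1) nreg endx (step_nonneg esp tot htot _) (by omega)
          (by rw [hnreg, hcnt]; ring) (fun hh => absurd hh hr)
          (fun c' hc' => hlast c' (by rw [getLast?_cons_ne_nil _ _ hr]; exact hc'))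
        rw [if_neg (show ¬ (k + 1 = 0) from by omega), show (-1:Int) + 1 = 0 from by norm_num] at h
        rw [show i + ((('x' :: rest).length : Nat) : Int) = (i + 1) + (rest.length : Int) from by
          simp only [List.length_cons]; push_cast; omega]
        exact h
    · have hbx : (c == 'x') = false := by simp [hc]
      rw [pvLoopA0, pvRegions]
      simp only [hbx, Bool.false_eq_true, if_false, false_or]
      by_cases hr : rest = []
      · subst hr
        have hendx : endx = false := by
          have h := hlast c (by simp)
          rw [h, hbx]
        rw [if_pos (show i = i + (([c].length : Nat) : Int) - 1 from by simp)]
        rw [pvRegions, rule0_cons]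
        rw [show esp + 1 + (if (c == '.' : Bool) then (1:Int) else 0) - 1
              = (if (c == '.' : Bool) then esp + 1 else esp) from by split_ifs <;> omega]
        rw [close_eq _ tot htot _
            ((k == 0) || ((k == nreg - 2 && endx) || (k == nreg - 1 && !endx))) (by
          have hk1 : (k == nreg - 1) = true := by
            simp only [beq_iff_eq]
            simp only [List.count_cons, List.count_nil, hbx] at hnreg
            push_cast at hnreg
            omega
          constructor
          · intro _
            simp [hendx, hk1]
          · intro _
            exact Or.inr (by simp))]
        rw [pvLoopA0, rule_nil]
      · rw [if_neg (show ¬ (i = i + ((((c :: rest).length) : Nat) : Int) - 1) from by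
          have := List.length_pos_iff.mpr hr
          simp only [List.length_cons]
          push_cast
          omega)]
        rw [show esp + 1 + (if (c == '.' : Bool) then (1:Int) else 0)
              = (if (c == '.' : Bool) then esp + 1 else esp) + 1 from by split_ifs <;> omega]
        have h := ih (i + 1) (if (c == '.' : Bool) then esp + 1 else esp) tot k nreg endx htot hk
          (by rw [hnreg]; simp [hc]) (fun hh => absurd hh hr)
          (fun c' hc' => hlast c' (by rw [getLast?_cons_ne_nil _ _ hr]; exact hc'))
        rw [show i + (((c :: rest).length : Nat) : Int) = (i + 1) + (rest.length : Int) from by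
          simp only [List.length_cons]; push_cast; omega]
        exact h

lemma loop2_eq (cs : List Char) : ∀ (i esp tot k nreg : Int) (endx : Bool),
    0 ≤ tot → 0 ≤ k →
    nreg = k + (cs.count 'x' : Int) + 1 →
    (cs = [] → esp = -1) →
    (∀ c', cs.getLast? = some c' → endx = (c' == 'x')) →
    pvLoopA2 (i + cs.length) cs i esp tot
      = pvRuleLoop 2 nreg endx (pvRegions cs (esp + 1)) k tot := by
  induction cs with
  | nil =>
    intro i esp tot k nreg endx htot hk hnreg hnil hlast
    rw [pvLoopA2, pvRegions, hnil rfl, show (-1:Int) + 1 = 0 from by norm_num]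
    exact (rule_tail_triv _ _ _ _ _ _ htot (by omega)).symm
  | cons c rest ih =>
    intro i esp tot k nreg endx htot hk hnreg hnil hlast
    by_cases hc : c = 'x'
    · subst hc
      rw [pvLoopA2, pvRegions]
      simp only [show (('x':Char) == '.') = false from rfl, show (('x':Char) == 'x') = true from rfl,
        Bool.false_eq_true, if_false, if_true, true_or]
      rw [rule2_cons, show esp + 1 - 1 = esp from by omega]
      by_cases hr : rest = []
      · subst hr
        have hendx : endx = true := by
          have h := hlast 'x' (by simp)
          simpa using h
        rw [close_eq esp tot htot _
            ((k == nreg - 2 && endx) || (k == nreg - 1 && !endx)) (by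
          constructor
          · intro _
            simp only [hendx, hnreg, List.count_cons, List.count_nil, beq_iff_eq]
            simp
            omega
          · intro _
            exact (show i = i + ((['x'].length : Nat) : Int) - 1 from by simp))]
        rw [pvLoopA2, pvRegions]
        exact (rule_tail_triv _ _ _ _ _ _ (step_nonneg esp tot htot _) (by omega)).symm
      · have hlen1 : (1:Int) ≤ rest.length := by
          have := List.length_pos_iff.mpr hr
          omega
        have hcnt : (('x' :: rest).count 'x' : Int) = (rest.count 'x' : Int) + 1 := by
          simp
        have hatEnd : ((k == nreg - 2 && endx) || (k == nreg - 1 && !endx)) = false := by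
          have h2 : (k == nreg - 1) = false := by
            simp only [beq_eq_false_iff_ne]
            omega
          by_cases hcz : rest.count 'x' = 0
          · obtain ⟨c', hc'⟩ : ∃ c', rest.getLast? = some c' := by
              cases hl : rest.getLast? with
              | none => exact absurd (List.getLast?_eq_none_iff.mp hl) hr
              | some x => exact ⟨x, rfl⟩
            have hend := hlast c' (by rw [getLast?_cons_ne_nil _ _ hr]; exact hc')
            have hcx' : c' ≠ 'x' := by
              intro h
              subst h
              exact (List.count_eq_zero.mp hcz) (List.mem_of_getLast? hc')
            have : endx = false := by
              rw [hend]
              simp [hcx']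
            simp [this, h2]
          · have h1 : (k == nreg - 2) = false := by
              simp only [beq_eq_false_iff_ne]
              omega
            simp [h1, h2]
        have hi : ¬ (i = i + ((('x' :: rest).length : Nat) : Int) - 1) := by
          simp only [List.length_cons]
          push_cast
          omega
        rw [close_eq esp tot htot _
            ((k == nreg - 2 && endx) || (k == nreg - 1 && !endx)) (by
          rw [hatEnd]
          simp only [Bool.false_eq_true, iff_false]
          exact hi)]
        have h := ih (i + 1) (-1)
          (if ((k == nreg - 2 && endx) || (k == nreg - 1 && !endx)) = true ∧ esp > tot
            then esp
            else if PySem.Int.floordiv esp 2 > tot then PySem.Int.floordiv esp 2 else tot)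
          (k + 1) nreg endx (step_nonneg esp tot htot _) (by omega)
          (by rw [hnreg, hcnt]; ring) (fun hh => absurd hh hr)
          (fun c' hc' => hlast c' (by rw [getLast?_cons_ne_nil _ _ hr]; exact hc'))
        rw [show (-1:Int) + 1 = 0 from by norm_num] at h
        rw [show i + ((('x' :: rest).length : Nat) : Int) = (i + 1) + (rest.length : Int) from by
          simp only [List.length_cons]; push_cast; omega]
        exact h
    · have hbx : (c == 'x') = false := by simp [hc]
      rw [pvLoopA2, pvRegions]
      simp only [hbx, Bool.false_eq_true, if_false, false_or]
      by_cases hr : rest = []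
      · subst hr
        have hendx : endx = false := by
          have h := hlast c (by simp)
          rw [h, hbx]
        rw [if_pos (show i = i + (([c].length : Nat) : Int) - 1 from by simp)]
        rw [pvRegions, rule2_cons]
        rw [show esp + 1 + (if (c == '.' : Bool) then (1:Int) else 0) - 1
              = (if (c == '.' : Bool) then esp + 1 else esp) from by split_ifs <;> omega]
        rw [close_eq _ tot htot _
            ((k == nreg - 2 && endx) || (k == nreg - 1 && !endx)) (by
          have hk1 : (k == nreg - 1) = true := by
            simp only [beq_iff_eq]
            simp only [List.count_cons, List.count_nil, hbx] at hnreg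
            push_cast at hnreg
            omega
          constructor
          · intro _
            simp [hendx, hk1]
          · intro _
            exact (show i = i + (([c].length : Nat) : Int) - 1 from by simp))]
        rw [pvLoopA2, rule_nil]
      · rw [if_neg (show ¬ (i = i + ((((c :: rest).length) : Nat) : Int) - 1) from by
          have := List.length_pos_iff.mpr hr
          simp only [List.length_cons]
          push_cast
          omega)]
        rw [show esp + 1 + (if (c == '.' : Bool) then (1:Int) else 0)
              = (if (c == '.' : Bool) then esp + 1 else esp) + 1 from by split_ifs <;> omega]
        have h := ih (i + 1) (if (c == '.' : Bool) then esp + 1 else esp) tot k nreg endx htot hk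
          (by rw [hnreg]; simp [hc]) (fun hh => absurd hh hr)
          (fun c' hc' => hlast c' (by rw [getLast?_cons_ne_nil _ _ hr]; exact hc'))
        rw [show i + (((c :: rest).length : Nat) : Int) = (i + 1) + (rest.length : Int) from by
          simp only [List.length_cons]; push_cast; omega]
        exact h

lemma camasdisp_eq_alt (prueba : String) (situacion : Int) :
    camasdisp prueba situacion = camasdisp_alt prueba situacion := by
  unfold camasdisp camasdisp_alt
  simp only []
  have hlast : ∀ c', prueba.toList.getLast? = some c' →
      PySem.Str.endswith prueba "x" = (c' == 'x') := by
    intro c' hc'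
    rw [PySem.Str.endswith_eq]
    exact endswith_getLast _ _ hc'
  have hnreg : (((pvRegions prueba.toList 0).length : Nat) : Int)
      = (prueba.toList.count 'x' : Int) + 1 := by
    rw [length_pvRegions]
    push_cast
    ring
  rw [hnreg]
  by_cases h0 : situacion = 0
  · subst h0
    rw [if_pos rfl]
    have h := loop0_eq prueba.toList 0 (-1) 0 0 ((prueba.toList.count 'x' : Int) + 1)
      (PySem.Str.endswith prueba "x") le_rfl le_rfl (by ring) (fun _ => rfl) hlast
    rw [zero_add, if_pos rfl, show (-1:Int) + 1 = 0 from by norm_num] at h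
    exact h
  · rw [if_neg h0]
    by_cases h1 : situacion = 1
    · subst h1
      rw [if_pos rfl]
      have h := loop1_eq prueba.toList (-1) 0 0 ((prueba.toList.count 'x' : Int) + 1)
        (PySem.Str.endswith prueba "x") le_rfl
      rw [show (-1:Int) + 1 = 0 from by norm_num] at h
      exact h
    · rw [if_neg h1]
      by_cases h2 : situacion = 2
      · subst h2
        rw [if_pos rfl]
        have h := loop2_eq prueba.toList 0 (-1) 0 0 ((prueba.toList.count 'x' : Int) + 1)
          (PySem.Str.endswith prueba "x") le_rfl le_rfl (by ring) (fun _ => rfl) hlast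
        rw [zero_add, show (-1:Int) + 1 = 0 from by norm_num] at h
        exact h
      · rw [if_neg h2]
        have h := loop3_eq situacion h0 h1 h2 prueba.toList (-1) 0 0
          ((prueba.toList.count 'x' : Int) + 1) (PySem.Str.endswith prueba "x") le_rfl le_rfl
        rw [if_pos rfl, show (-1:Int) + 1 = 0 from by norm_num] at h
        exact h

-- ===== VERDICT (by name: the statement is the Claim_ definition above) =====
theorem camasdisp_spec : Claim_equal_camasdisp := by
  intro prueba situacion _
  exact camasdisp_eq_alt prueba situacion
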